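-- pv_equiv track=rewrite | github.com/leggedrobotics/bev_semantic_map | perception_bev_learning/perception_bev_learning/dataset/bev_dataset_temporal.py | find_continuous_sequences
-- ===== SOURCE A (Python) =====
-- def find_continuous_sequences(indices, seq_length):
--     continuous_sequences = []
--     current_sequence = []
--
--     for idx in indices:
--         if not current_sequence or idx == current_sequence[-1] + 1:
--             current_sequence.append(idx)
--         else:
--             current_sequence = [idx]
--
--         if len(current_sequence) == seq_length:
--             continuous_sequences.append(current_sequence.copy())
--             current_sequence = []
--
--     return continuous_sequences
-- ===== SOURCE B (Python) =====
-- def _runs(indices):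
--     runs = []
--     cur = []
--     for idx in indices:
--         if cur and idx == cur[-1] + 1:
--             cur.append(idx)
--         else:
--             if cur:
--                 runs.append(cur)
--             cur = [idx]
--     if cur:
--         runs.append(cur)
--     return runs
--
--
-- def _chunks(run, seq_length):
--     out = []
--     while len(run) >= seq_length:
--         out.append(run[:seq_length])
--         run = run[seq_length:]
--     return out
--
--
-- def find_continuous_sequences(indices, seq_length):
--     if seq_length <= 0:
--         return []
--     out = []
--     for run in _runs(indices):
--         out += _chunks(run, seq_length)
--     return out
-- ===== Notes on version B (the rewrite author's own statement) =====
-- stated objective: alternative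
-- what changed: A's single loop that interleaves run tracking with chunk emission and state resets is replaced by a two-phase decomposition: first build the maximal consecutive runs, then cut each run into floor(len/seq_length) chunks, discarding remainders.
import Mathlib
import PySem

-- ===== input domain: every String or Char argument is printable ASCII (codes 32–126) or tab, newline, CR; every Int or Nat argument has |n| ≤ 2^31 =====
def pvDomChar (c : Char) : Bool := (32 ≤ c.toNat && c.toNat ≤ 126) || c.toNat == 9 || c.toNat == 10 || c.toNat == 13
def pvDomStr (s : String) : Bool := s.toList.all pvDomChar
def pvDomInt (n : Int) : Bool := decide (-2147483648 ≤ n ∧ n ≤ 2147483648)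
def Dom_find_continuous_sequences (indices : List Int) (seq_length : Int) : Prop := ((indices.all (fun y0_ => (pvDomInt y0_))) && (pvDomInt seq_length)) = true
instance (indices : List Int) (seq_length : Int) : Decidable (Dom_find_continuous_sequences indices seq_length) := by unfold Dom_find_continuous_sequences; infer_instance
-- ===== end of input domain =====

-- B replaces A's interleaved emit-and-reset loop by a two-phase decomposition (build maximal
-- runs, then chunk each run); same cost, objective: alternative decomposition.

-- ===== PORT A =====
-- one iteration of A's for-loop: state = (continuous_sequences, current_sequence)
def fcsStepA (seq_length : Int) (s : List (List Int) × List Int) (idx : Int) : List (List Int) × List Int :=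
  let cur : List Int :=
    if s.2 = [] ∨ idx = PySem.List.pyGetD s.2 (-1) 0 + 1 then s.2 ++ [idx] else [idx]
  if (cur.length : Int) = seq_length then (s.1 ++ [cur], []) else (s.1, cur)

def find_continuous_sequences (indices : List Int) (seq_length : Int) : List (List Int) :=
  (indices.foldl (fcsStepA seq_length) ([], [])).1

-- ===== PORT B =====
-- _runs: one iteration; state = (runs, cur)
def fcsRunsStep (s : List (List Int) × List Int) (idx : Int) : List (List Int) × List Int :=
  if s.2 ≠ [] ∧ idx = PySem.List.pyGetD s.2 (-1) 0 + 1 then (s.1, s.2 ++ [idx])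
  else ((if s.2 ≠ [] then s.1 ++ [s.2] else s.1), [idx])

def fcsRuns (indices : List Int) : List (List Int) :=
  let s := indices.foldl fcsRunsStep ([], [])
  if s.2 ≠ [] then s.1 ++ [s.2] else s.1

-- _chunks' while loop; run[:L] / run[L:] are take/drop (L ≥ 0 here, exact).
-- The '0 < L' conjunct is a totality guard only: the caller guarantees seq_length > 0.
def fcsChunks (run : List Int) (L : Nat) : List (List Int) :=
  if _h : 0 < L ∧ L ≤ run.length then run.take L :: fcsChunks (run.drop L) L else []
termination_by run.length
decreasing_by simp; omega

def find_continuous_sequences_alt (indices : List Int) (seq_length : Int) : List (List Int) :=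
  if seq_length ≤ 0 then []
  else (fcsRuns indices).foldl (fun out run => out ++ fcsChunks run seq_length.toNat) []

-- ===== PRECONDITION & SPEC =====
def Spec_find_continuous_sequences (indices : List Int) (seq_length : Int) (out : List (List Int)) : Prop := out = find_continuous_sequences_alt indices seq_length
instance (indices : List Int) (seq_length : Int) (out : List (List Int)) : Decidable (Spec_find_continuous_sequences indices seq_length out) := by unfold Spec_find_continuous_sequences; infer_instance

-- ===== CLAIM (what is proved, stated in full; the proofs are below) =====
def Claim_equal_find_continuous_sequences : Prop := ∀ (indices : List Int) (seq_length : Int), Dom_find_continuous_sequences indices seq_length → Spec_find_continuous_sequences indices seq_length (find_continuous_sequences indices seq_length)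

-- ===== LEMMAS AND PROOFS =====

-- the part of `run` A would still be holding in current_sequence after chunking `run`
def fcsRem (run : List Int) (L : Nat) : List Int :=
  if _h : 0 < L ∧ L ≤ run.length then fcsRem (run.drop L) L else run
termination_by run.length
decreasing_by simp; omega

lemma fcsChunks_nil (L : Nat) : fcsChunks [] L = [] := by
  rw [fcsChunks]; simp; omega

lemma fcsRem_nil (L : Nat) : fcsRem [] L = [] := by
  rw [fcsRem]; simp; omega

lemma fcsRem_ne_nil {run : List Int} {L : Nat} (h : fcsRem run L ≠ []) : run ≠ [] := by
  intro hrun; rw [hrun, fcsRem_nil] at h; exact h rfl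

lemma pyGetD_last (l : List Int) (h : l ≠ []) :
    PySem.List.pyGetD l (-1) (0:Int) = l.getLast?.getD 0 := by
  rw [PySem.List.pyGetD_neg_one l 0 h, List.getLast?_eq_some_getLast h]; rfl

lemma getLast?_drop' (l : List Int) (n : Nat) (h : l.drop n ≠ []) :
    (l.drop n).getLast? = l.getLast? := by
  conv_rhs => rw [← List.take_append_drop n l]
  exact (List.getLast?_append_of_ne_nil (l.take n) h).symm

lemma fcsRem_getLast? (run : List Int) (L : Nat) (h : fcsRem run L ≠ []) :
    (fcsRem run L).getLast? = run.getLast? := by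
  fun_induction fcsRem run L with
  | case1 run hc ih =>
      rw [ih h]
      exact getLast?_drop' run L (fcsRem_ne_nil h)
  | case2 run hc => rfl

lemma fcsChunks_append (s : List Int) (x : Int) (L : Nat) (hL : 0 < L) :
    fcsChunks (s ++ [x]) L
      = fcsChunks s L ++ (if (fcsRem s L).length + 1 = L then [fcsRem s L ++ [x]] else []) := by
  fun_induction fcsRem s L with
  | case1 s hc ih =>
      have h1 : fcsChunks (s ++ [x]) L = s.take L :: fcsChunks (s.drop L ++ [x]) L := by
        conv_lhs => rw [fcsChunks]
        rw [dif_pos ⟨hL, by simp; omega⟩, List.take_append_of_le_length hc.2,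
            List.drop_append_of_le_length hc.2]
      have h2 : fcsChunks s L = s.take L :: fcsChunks (s.drop L) L := by
        conv_lhs => rw [fcsChunks]
        rw [dif_pos hc]
      rw [h1, h2, ih]
      simp
  | case2 s hc =>
      have h2 : fcsChunks s L = [] := by
        conv_lhs => rw [fcsChunks]
        rw [dif_neg hc]
      by_cases h1 : s.length + 1 = L
      · have hA : fcsChunks (s ++ [x]) L = [s ++ [x]] := by
          conv_lhs => rw [fcsChunks]
          rw [dif_pos ⟨hL, by simp; omega⟩, List.take_of_length_le (by simp; omega),
              List.drop_eq_nil_of_le (by simp; omega), fcsChunks_nil]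
        rw [hA, h2, if_pos h1]
        simp
      · have hA : fcsChunks (s ++ [x]) L = [] := by
          conv_lhs => rw [fcsChunks]
          rw [dif_neg (by simp; omega)]
        rw [hA, h2, if_neg h1]
        simp

lemma fcsRem_append (s : List Int) (x : Int) (L : Nat) (hL : 0 < L) :
    fcsRem (s ++ [x]) L = if (fcsRem s L).length + 1 = L then [] else fcsRem s L ++ [x] := by
  fun_induction fcsRem s L with
  | case1 s hc ih =>
      conv_lhs => rw [fcsRem]
      rw [dif_pos ⟨hL, by simp; omega⟩, List.drop_append_of_le_length hc.2, ih]
  | case2 s hc =>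
      by_cases h1 : s.length + 1 = L
      · conv_lhs => rw [fcsRem]
        rw [dif_pos ⟨hL, by simp; omega⟩, List.drop_eq_nil_of_le (by simp; omega),
            fcsRem_nil, if_pos h1]
      · conv_lhs => rw [fcsRem]
        rw [dif_neg (by simp; omega), if_neg h1]

-- A emits nothing for seq_length ≤ 0: current_sequence is never empty at the length test
lemma loopA_nonpos (seq_length : Int) (hL : seq_length ≤ 0) :
    ∀ (xs : List Int) (acc : List (List Int)) (cur : List Int),
      (xs.foldl (fcsStepA seq_length) (acc, cur)).1 = acc := by
  intro xs
  induction xs with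
  | nil => intro acc cur; rfl
  | cons x xs ih =>
      intro acc cur
      rw [List.foldl_cons]
      have key : ∀ (c : List Int), c ≠ [] →
          (if ((c.length : Int)) = seq_length then (acc ++ [c], ([] : List Int)) else (acc, c))
            = (acc, c) := by
        intro c hcne
        apply if_neg
        intro h
        have hc0 : c.length ≠ 0 := by simpa using hcne
        omega
      have hstep : fcsStepA seq_length (acc, cur) x
          = (acc, if cur = [] ∨ x = PySem.List.pyGetD cur (-1) 0 + 1 then cur ++ [x] else [x]) := by
        simp only [fcsStepA]
        exact key _ (by split <;> simp)
      rw [hstep, ih]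

def fcsFinal (s : List (List Int) × List Int) : List (List Int) :=
  if s.2 ≠ [] then s.1 ++ [s.2] else s.1

lemma fcsChunks_singleton (x : Int) (L : Nat) (hL : 0 < L) :
    fcsChunks [x] L = if L = 1 then [[x]] else [] := by
  by_cases h1 : L = 1
  · subst h1
    rw [fcsChunks, dif_pos (by simp)]
    simp [fcsChunks_nil]
  · rw [fcsChunks, dif_neg (by simp; omega), if_neg h1]

lemma fcsRem_singleton (x : Int) (L : Nat) (hL : 0 < L) :
    fcsRem [x] L = if L = 1 then [] else [x] := by
  by_cases h1 : L = 1
  · subst h1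
    conv_lhs => rw [fcsRem]
    rw [dif_pos (by simp)]
    simp [fcsRem_nil]
  · conv_lhs => rw [fcsRem]
    rw [dif_neg (by simp; omega), if_neg h1]

-- main simulation invariant: A's accumulator is the chunks of B's closed runs plus the chunks
-- of B's open run, and A's current_sequence is the un-chunked remainder of B's open run
lemma loop_main (L : Nat) (hL : 0 < L) :
    ∀ (xs : List Int) (runs : List (List Int)) (cur : List Int),
      (xs.foldl (fcsStepA (L : Int))
        (runs.flatMap (fun r => fcsChunks r L) ++ fcsChunks cur L, fcsRem cur L)).1
      = (fcsFinal (xs.foldl fcsRunsStep (runs, cur))).flatMap (fun r => fcsChunks r L) := by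
  intro xs
  induction xs with
  | nil =>
      intro runs cur
      rw [List.foldl_nil, List.foldl_nil]
      unfold fcsFinal
      by_cases hc : cur = []
      · simp [hc, fcsChunks_nil]
      · simp [hc]
  | cons x xs ih =>
      intro runs cur
      rw [List.foldl_cons, List.foldl_cons]
      by_cases hcont : cur ≠ [] ∧ x = PySem.List.pyGetD cur (-1) 0 + 1
      · -- the open run continues
        have hBstep : fcsRunsStep (runs, cur) x = (runs, cur ++ [x]) := by
          simp only [fcsRunsStep]
          rw [if_pos hcont]
        have hcondA : fcsRem cur L = [] ∨ x = PySem.List.pyGetD (fcsRem cur L) (-1) 0 + 1 := by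
          by_cases hrem : fcsRem cur L = []
          · exact Or.inl hrem
          · refine Or.inr ?_
            rw [pyGetD_last _ hrem, fcsRem_getLast? cur L hrem, ← pyGetD_last _ hcont.1]
            exact hcont.2
        have hAstep : fcsStepA (L : Int)
              (runs.flatMap (fun r => fcsChunks r L) ++ fcsChunks cur L, fcsRem cur L) x
            = (runs.flatMap (fun r => fcsChunks r L) ++ fcsChunks (cur ++ [x]) L,
               fcsRem (cur ++ [x]) L) := by
          simp only [fcsStepA]
          rw [if_pos hcondA, fcsChunks_append cur x L hL, fcsRem_append cur x L hL]
          by_cases hfull : (fcsRem cur L).length + 1 = L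
          · rw [if_pos (by simp; omega), if_pos hfull, if_pos hfull]
            simp
          · rw [if_neg (by simp; omega), if_neg hfull, if_neg hfull]
            simp
        rw [hAstep, hBstep, ih]
      · -- the open run breaks (or there is none)
        have hBstep : fcsRunsStep (runs, cur) x
            = ((if cur ≠ [] then runs ++ [cur] else runs), [x]) := by
          simp only [fcsRunsStep]
          rw [if_neg hcont]
        have hcurA : (if fcsRem cur L = [] ∨ x = PySem.List.pyGetD (fcsRem cur L) (-1) 0 + 1
            then fcsRem cur L ++ [x] else [x]) = [x] := by
          by_cases hrem : fcsRem cur L = []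
          · rw [if_pos (Or.inl hrem), hrem]
            rfl
          · rw [if_neg]
            push Not at hcont
            intro hor
            rcases hor with h | h
            · exact hrem h
            · rw [pyGetD_last _ hrem, fcsRem_getLast? cur L hrem,
                  ← pyGetD_last _ (fcsRem_ne_nil hrem)] at h
              exact hcont (fcsRem_ne_nil hrem) h
        have hflat : (if cur ≠ [] then runs ++ [cur] else runs).flatMap (fun r => fcsChunks r L)
            = runs.flatMap (fun r => fcsChunks r L) ++ fcsChunks cur L := by
          by_cases hc : cur = []
          · simp [hc, fcsChunks_nil]
          · simp [hc]
        have hAstep : fcsStepA (L : Int)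
              (runs.flatMap (fun r => fcsChunks r L) ++ fcsChunks cur L, fcsRem cur L) x
            = ((if cur ≠ [] then runs ++ [cur] else runs).flatMap (fun r => fcsChunks r L)
                ++ fcsChunks [x] L, fcsRem [x] L) := by
          simp only [fcsStepA]
          rw [hcurA, fcsChunks_singleton x L hL, fcsRem_singleton x L hL, hflat]
          by_cases h1 : L = 1
          · rw [if_pos (by simp [h1]), if_pos h1, if_pos h1]
          · rw [if_neg (by simp; omega), if_neg h1, if_neg h1]
            simp
        rw [hAstep, hBstep, ih]

-- ===== VERDICT (by name: the statement is the Claim_ definition above) =====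
theorem find_continuous_sequences_spec : Claim_equal_find_continuous_sequences := by
  intro indices seq_length _
  unfold Spec_find_continuous_sequences find_continuous_sequences find_continuous_sequences_alt
  by_cases hL : seq_length ≤ 0
  · simp [hL, loopA_nonpos seq_length hL indices [] []]
  · push Not at hL
    simp only [if_neg (by omega : ¬ seq_length ≤ 0)]
    have hcast : ((seq_length.toNat : Int)) = seq_length := Int.toNat_of_nonneg (by omega)
    have hpos : 0 < seq_length.toNat := by omega
    have := loop_main seq_length.toNat hpos indices [] []
    rw [fcsChunks_nil, fcsRem_nil] at this
    simp only [List.flatMap_nil, List.nil_append, hcast] at this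
    rw [this]
    rw [PySem.List.foldl_append_eq_flatMap]
    rfl
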